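-- pv_equiv track=rewrite | github.com/kilicaliisildayancan/multi-GPCR | scripts/plotting/HSPplots/movingAvg_hitVector.py | find_domains
-- ===== SOURCE A (Python) =====
-- def find_domains(boolVector,span_threshold):
--
--     ### compressing boolVector ###
--     ctr=0
--     cmprVec=[]
--     for i in boolVector:
--         ctr+=i
--         if i==0:
--             cmprVec.append(ctr)
--             ctr=0
--     ### evaluating for span threshold ###
--     # if a domain is longer/bigger than the threshold, the indexes of this domain are preserved for later use
--
--     # convert zeros into ones for indexing
--     for i in range(len(cmprVec)):
--         if cmprVec[i]==0:
--             cmprVec[i]=1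
--
--
--     dmn_indx_dict={}
--     for i in range(len(cmprVec)):
--         if cmprVec[i] >= span_threshold:
--             st_indx=sum(cmprVec[:i]) #adds all the compressed domains before it
--             end_indx=sum(cmprVec[:i+1]) #adds the length of this domain on top of the start index
--
--             dmn_indx_dict[f'{len(dmn_indx_dict)}']=[st_indx,end_indx]
--         else:
--             pass
--
--
--     return dmn_indx_dict
-- ===== SOURCE B (Python) =====
-- def find_domains(boolVector, span_threshold):
--     # Single fused pass: maintains the current run sum and a running prefix sum
--     # of the effective (zero->1 converted) domain lengths.
--     result = {}
--     run = 0
--     prefix = 0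
--     for x in boolVector:
--         if x == 0:
--             length = run if run != 0 else 1
--             if length >= span_threshold:
--                 result[str(len(result))] = [prefix, prefix + length]
--             prefix += length
--             run = 0
--         else:
--             run += x
--     return result
-- ===== Notes on version B (the rewrite author's own statement) =====
-- stated objective: alternative
-- what changed: One fused linear pass keeping a running prefix sum of the converted domain lengths, replacing A's three separate passes with slice re-summation inside the last loop.
import Mathlib
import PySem

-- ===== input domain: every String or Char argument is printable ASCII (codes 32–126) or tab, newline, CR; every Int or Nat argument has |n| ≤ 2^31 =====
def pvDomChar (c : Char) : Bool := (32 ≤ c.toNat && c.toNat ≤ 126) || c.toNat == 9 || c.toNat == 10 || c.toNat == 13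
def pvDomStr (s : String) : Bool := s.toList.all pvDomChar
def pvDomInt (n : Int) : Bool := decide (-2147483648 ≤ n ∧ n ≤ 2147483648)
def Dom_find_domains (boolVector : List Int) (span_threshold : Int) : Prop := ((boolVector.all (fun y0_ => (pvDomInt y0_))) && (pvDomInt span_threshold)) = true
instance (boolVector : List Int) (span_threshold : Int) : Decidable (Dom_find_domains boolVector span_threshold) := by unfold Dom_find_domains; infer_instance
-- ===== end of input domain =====

-- B fuses A's three passes into one linear pass with a running prefix sum (no slice re-summation); proved to return the same dict.

-- ===== PORT A =====
def find_domains (boolVector : List Int) (span_threshold : Int) : List (String × List Int) :=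
  -- ### compressing boolVector ###
  let s := boolVector.foldl (fun (s : Int × List Int) i =>
    let ctr := s.1 + i
    if i = 0 then (0, s.2 ++ [ctr]) else (ctr, s.2)) (0, [])
  let cmprVec := s.2
  -- convert zeros into ones for indexing (in-place assignment cmprVec[i] = 1 → pySetD; i ∈ range(len) is in range)
  let cmprVec2 := (PySem.List.pyRange 0 (cmprVec.length : Int) 1).foldl
    (fun v i => if PySem.List.pyGetD v i 0 = 0 then PySem.List.pySetD v i 1 else v) cmprVec
  -- dict-building loop with slice sums
  let d := (PySem.List.pyRange 0 (cmprVec2.length : Int) 1).foldl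
    (fun (d : PySem.Dict String (List Int)) i =>
      if PySem.List.pyGetD cmprVec2 i 0 ≥ span_threshold then
        let st_indx := (PySem.List.slice cmprVec2 none (some i)).sum
        let end_indx := (PySem.List.slice cmprVec2 none (some (i + 1))).sum
        d.insert (PySem.Int.toStr (d.size : Int)) [st_indx, end_indx]
      else d)
    PySem.Dict.empty
  d.items

-- ===== PORT B =====
def find_domains_alt (boolVector : List Int) (span_threshold : Int) : List (String × List Int) :=
  let s := boolVector.foldl (fun (s : Int × Int × PySem.Dict String (List Int)) x =>
    let run := s.1
    let pre := s.2.1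
    let d := s.2.2
    if x = 0 then
      let length := if run ≠ 0 then run else 1
      let d' := if length ≥ span_threshold then
          d.insert (PySem.Int.toStr (d.size : Int)) [pre, pre + length] else d
      (0, pre + length, d')
    else (run + x, pre, d)) (0, 0, PySem.Dict.empty)
  s.2.2.items

-- ===== PRECONDITION & SPEC =====
def Spec_find_domains (boolVector : List Int) (span_threshold : Int) (out : List (String × List Int)) : Prop := out = find_domains_alt boolVector span_threshold
instance (boolVector : List Int) (span_threshold : Int) (out : List (String × List Int)) : Decidable (Spec_find_domains boolVector span_threshold out) := by unfold Spec_find_domains; infer_instance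

-- ===== CLAIM (what is proved, stated in full; the proofs are below) =====
def Claim_equal_find_domains : Prop := ∀ (boolVector : List Int) (span_threshold : Int), Dom_find_domains boolVector span_threshold → Spec_find_domains boolVector span_threshold (find_domains boolVector span_threshold)

-- ===== LEMMAS AND PROOFS =====

-- the compressed vector (A's first loop, as structural recursion)
def pvComp (ctr : Int) : List Int → List Int
  | [] => []
  | x :: xs => if x = 0 then (ctr + x) :: pvComp 0 xs else pvComp (ctr + x) xs

-- zero→one conversion
def pvConv (x : Int) : Int := if x = 0 then 1 else x

-- the dict-building scan with an explicit running prefix sum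
def pvLoop (t : Int) : List Int → Int → PySem.Dict String (List Int) → PySem.Dict String (List Int)
  | [], _, d => d
  | x :: xs, pre, d => pvLoop t xs (pre + x)
      (if x ≥ t then d.insert (PySem.Int.toStr (d.size : Int)) [pre, pre + x] else d)

theorem pvComp_foldl (bv : List Int) : ∀ (ctr : Int) (acc : List Int),
    (bv.foldl (fun (s : Int × List Int) i =>
      let ctr := s.1 + i
      if i = 0 then (0, s.2 ++ [ctr]) else (ctr, s.2)) (ctr, acc)).2 = acc ++ pvComp ctr bv := by
  induction bv with
  | nil => intro ctr acc; simp [pvComp]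
  | cons x xs ih =>
    intro ctr acc
    by_cases hx : x = 0 <;> simp [pvComp, hx, ih, List.append_assoc]

theorem pvSet_append {α : Type} (l₁ : List α) (x v : α) (l₂ : List α) :
    (l₁ ++ x :: l₂).set l₁.length v = l₁ ++ v :: l₂ := by
  induction l₁ with
  | nil => simp
  | cons a t ih => simp [ih]

theorem pvGet_append (l₁ : List Int) (x : Int) (l₂ : List Int) (d : Int) :
    PySem.List.pyGetD (l₁ ++ x :: l₂) (l₁.length : Int) d = x := by
  rw [PySem.List.pyGetD_natCast, List.getD_eq_getElem?_getD,
    List.getElem?_append_right (le_refl _)]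
  simp

theorem pvConv_foldl (xs : List Int) : ∀ (k : Nat), k ≤ xs.length →
    (PySem.List.pyRange 0 (k : Int) 1).foldl
      (fun v i => if PySem.List.pyGetD v i 0 = 0 then PySem.List.pySetD v i 1 else v) xs
    = (xs.take k).map pvConv ++ xs.drop k := by
  intro k
  induction k with
  | zero => intro _; simp [PySem.List.pyRange_one_eq_nil]
  | succ k ih =>
    intro hk
    have hk' : k ≤ xs.length := Nat.le_of_succ_le hk
    have hklt : k < xs.length := hk
    have hcast : ((k + 1 : Nat) : Int) = (k : Int) + 1 := by push_cast; ring
    rw [hcast, PySem.List.pyRange_one_succ_right (by positivity), List.foldl_append, ih hk']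
    have hlen : ((xs.take k).map pvConv).length = k := by
      simp [List.length_take, Nat.min_eq_left hk']
    have hdrop : xs.drop k = xs[k] :: xs.drop (k + 1) := List.drop_eq_getElem_cons hklt
    have htake : xs.take (k + 1) = xs.take k ++ [xs[k]] := by
      rw [List.take_add_one, List.getElem?_eq_getElem hklt]; rfl
    rw [hdrop, htake]
    simp only [List.foldl_cons, List.foldl_nil]
    rw [show (k : Int) = (((xs.take k).map pvConv).length : Int) by rw [hlen]]
    rw [pvGet_append]
    by_cases h0 : xs[k] = 0
    · rw [if_pos h0, PySem.List.pySetD_natCast, pvSet_append]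
      simp [pvConv, h0]
    · rw [if_neg h0]
      have hcv : pvConv xs[k] = xs[k] := by simp [pvConv, h0]
      simp only [List.map_append, List.map_cons, List.map_nil, hcv, List.append_assoc,
        List.singleton_append]

theorem pvLoop_append (t : Int) (as : List Int) : ∀ (x pre : Int) (d : PySem.Dict String (List Int)),
    pvLoop t (as ++ [x]) pre d =
      (if x ≥ t then (pvLoop t as pre d).insert
          (PySem.Int.toStr ((pvLoop t as pre d).size : Int)) [pre + as.sum, pre + as.sum + x]
        else pvLoop t as pre d) := by
  induction as with
  | nil => intro x pre d; simp [pvLoop]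
  | cons a rest ih =>
    intro x pre d
    simp only [List.cons_append, pvLoop, ih, List.sum_cons]
    ring_nf

theorem pvDict_foldl (t : Int) (ys : List Int) : ∀ (k : Nat), k ≤ ys.length →
    (PySem.List.pyRange 0 (k : Int) 1).foldl
      (fun (d : PySem.Dict String (List Int)) i =>
        if PySem.List.pyGetD ys i 0 ≥ t then
          let st_indx := (PySem.List.slice ys none (some i)).sum
          let end_indx := (PySem.List.slice ys none (some (i + 1))).sum
          d.insert (PySem.Int.toStr (d.size : Int)) [st_indx, end_indx]
        else d)
      PySem.Dict.empty
    = pvLoop t (ys.take k) 0 PySem.Dict.empty := by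
  intro k
  induction k with
  | zero => intro _; simp [PySem.List.pyRange_one_eq_nil, pvLoop]
  | succ k ih =>
    intro hk
    have hk' : k ≤ ys.length := Nat.le_of_succ_le hk
    have hklt : k < ys.length := hk
    have hcast : ((k + 1 : Nat) : Int) = (k : Int) + 1 := by push_cast; ring
    rw [hcast, PySem.List.pyRange_one_succ_right (by positivity), List.foldl_append, ih hk']
    have hget : PySem.List.pyGetD ys (k : Int) 0 = ys[k] := by
      rw [PySem.List.pyGetD_natCast, List.getD_eq_getElem?_getD, List.getElem?_eq_getElem hklt]
      rfl
    have hsl1 : PySem.List.slice ys none (some (k : Int)) = ys.take k :=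
      PySem.List.slice_to_natCast ys k
    have hsl2 : PySem.List.slice ys none (some ((k : Int) + 1)) = ys.take (k + 1) := by
      have : ((k : Int) + 1) = ((k + 1 : Nat) : Int) := by push_cast; ring
      rw [this]; exact PySem.List.slice_to_natCast ys (k + 1)
    have htake : ys.take (k + 1) = ys.take k ++ [ys[k]] := by
      rw [List.take_add_one, List.getElem?_eq_getElem hklt]; rfl
    simp only [List.foldl_cons, List.foldl_nil, hget, hsl1, hsl2, htake,
      pvLoop_append, List.sum_append, List.sum_cons, List.sum_nil]
    by_cases hc : ys[k] ≥ t
    · rw [if_pos hc, if_pos hc]; ring_nf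
    · rw [if_neg hc, if_neg hc]

theorem pvAlt_foldl (t : Int) (bv : List Int) :
    ∀ (run pre : Int) (d : PySem.Dict String (List Int)),
    (bv.foldl (fun (s : Int × Int × PySem.Dict String (List Int)) x =>
      let run := s.1
      let pre := s.2.1
      let d := s.2.2
      if x = 0 then
        let length := if run ≠ 0 then run else 1
        let d' := if length ≥ t then
            d.insert (PySem.Int.toStr (d.size : Int)) [pre, pre + length] else d
        (0, pre + length, d')
      else (run + x, pre, d)) (run, pre, d)).2.2
    = pvLoop t ((pvComp run bv).map pvConv) pre d := by
  induction bv with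
  | nil => intro run pre d; simp [pvComp, pvLoop]
  | cons x xs ih =>
    intro run pre d
    by_cases hx : x = 0
    · have hconv : (if run ≠ 0 then run else 1) = pvConv run := by
        unfold pvConv; by_cases h : run = 0 <;> simp [h]
      simp only [hx, pvComp, List.foldl_cons]
      rw [show run + (0 : Int) = run by ring] at *
      simp only [hconv] at *
      exact ih 0 (pre + pvConv run) _
    · simp only [pvComp, hx, List.foldl_cons]
      simpa using ih (run + x) pre d

-- ===== VERDICT (by name: the statement is the Claim_ definition above) =====
theorem find_domains_spec : Claim_equal_find_domains := by
  intro bv t _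
  unfold Spec_find_domains find_domains find_domains_alt
  simp only
  rw [pvAlt_foldl]
  have h1 := pvComp_foldl bv 0 []
  rw [h1]
  simp only [List.nil_append]
  set c := pvComp 0 bv with hc
  have h2 := pvConv_foldl c c.length (le_refl _)
  rw [h2]
  simp only [List.take_length, List.drop_length, List.append_nil]
  have h3 := pvDict_foldl t (c.map pvConv) (c.map pvConv).length (le_refl _)
  rw [h3, List.take_length]
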